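-- pv_equiv track=rewrite | github.com/anastasiakuznietsova/Information-Security-Labs | labs_backend/utils/rand_num_gen.py | pseudo_rand_num
-- ===== SOURCE A (Python) =====
-- def pseudo_rand_num(n:int):
--     m = 2 ** 21 - 1
--     a = 8 ** 3
--     c = 144
--     x_0 = 3
--     period = 0
--
--     x = []
--
--     for i in range(n):
--         x.append(x_0)
--         x_0 = (a*x_0 + c) % m
--         if (not period) and (x_0 in x):
--             period = len(x)
--
--     return x,period
-- ===== SOURCE B (Python) =====
-- def pseudo_rand_num(n: int):
--     # Two-pass decomposition: generate n+1 LCG values first, then detect the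
--     # first repeat in a separate scan with a seen-set.
--     m = 2 ** 21 - 1
--     a = 8 ** 3
--     c = 144
--     values = []
--     v = 3
--     for _ in range(n + 1):
--         values.append(v)
--         v = (a * v + c) % m
--     x = values[:n]
--     period = 0
--     seen = set()
--     for j, val in enumerate(values):
--         if val in seen:
--             period = j
--             break
--         seen.add(val)
--     return x, period
-- ===== Notes on version B (the rewrite author's own statement) =====
-- stated objective: alternative
-- what changed: A's single fused build-and-detect loop is split into two separate passes: a pure generation loop producing the values list (with one extra value beyond the returned prefix), then a seen-set scan that finds the first repeated value (A's period) with an early break.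
import Mathlib
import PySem

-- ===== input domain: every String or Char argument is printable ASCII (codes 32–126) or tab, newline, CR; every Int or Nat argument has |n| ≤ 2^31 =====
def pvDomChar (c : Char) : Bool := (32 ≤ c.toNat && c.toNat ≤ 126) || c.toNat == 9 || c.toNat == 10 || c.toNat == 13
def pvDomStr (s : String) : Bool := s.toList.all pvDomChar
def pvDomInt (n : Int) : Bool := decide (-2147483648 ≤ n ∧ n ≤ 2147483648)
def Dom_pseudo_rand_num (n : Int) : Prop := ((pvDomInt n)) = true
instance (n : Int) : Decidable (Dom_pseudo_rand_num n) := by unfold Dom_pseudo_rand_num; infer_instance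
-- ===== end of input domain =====

-- B replaces A's fused build-and-detect loop by two passes: generate n+1 LCG values,
-- then scan once with a seen-set for the first repeat (objective: alternative decomposition).

-- ===== PORT A =====
def pseudo_rand_num (n : Int) : List Int × Int :=
  let m : Int := 2 ^ 21 - 1
  let a : Int := 8 ^ 3
  let c : Int := 144
  let st := (PySem.List.pyRange 0 n 1).foldl
    (fun (s : List Int × Int × Int) _ =>
      let x := s.1 ++ [s.2.1]
      let x0 := PySem.Int.mod (a * s.2.1 + c) m
      let period := if s.2.2 = 0 ∧ x.contains x0 then (x.length : Int) else s.2.2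
      (x, x0, period))
    ([], 3, 0)
  (st.1, st.2.2)

-- ===== PORT B =====
-- the 'for j, val in enumerate(values): … break' scan of Source B
def prnDetect : List Int → PySem.Set Int → Int → Int
  | [], _, _ => 0
  | v :: rest, seen, j =>
      if PySem.Set.contains seen v then j
      else prnDetect rest (PySem.Set.add seen v) (j + 1)

def pseudo_rand_num_alt (n : Int) : List Int × Int :=
  let m : Int := 2 ^ 21 - 1
  let a : Int := 8 ^ 3
  let c : Int := 144
  let gen := (PySem.List.pyRange 0 (n + 1) 1).foldl
    (fun (s : List Int × Int) _ => (s.1 ++ [s.2], PySem.Int.mod (a * s.2 + c) m))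
    ([], 3)
  let values := gen.1
  let x := PySem.List.slice values none (some n)
  (x, prnDetect values PySem.Set.empty 0)

-- ===== PRECONDITION & SPEC =====
def Spec_pseudo_rand_num (n : Int) (out : List Int × Int) : Prop := out = pseudo_rand_num_alt n
instance (n : Int) (out : List Int × Int) : Decidable (Spec_pseudo_rand_num n out) := by unfold Spec_pseudo_rand_num; infer_instance

-- ===== CLAIM (what is proved, stated in full; the proofs are below) =====
def Claim_equal_pseudo_rand_num : Prop := ∀ (n : Int), Dom_pseudo_rand_num n → Spec_pseudo_rand_num n (pseudo_rand_num n)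

-- ===== LEMMAS AND PROOFS =====

-- the LCG sequence x_0 = 3, x_{k+1} = (512*x_k + 144) % (2^21 - 1)
def prnSeq : Nat → Int
  | 0 => 3
  | k + 1 => PySem.Int.mod (8 ^ 3 * prnSeq k + 144) (2 ^ 21 - 1)

def prnVals (k : Nat) : List Int := (List.range k).map prnSeq

-- A's period value after k iterations
def prnQ : Nat → Int
  | 0 => 0
  | k + 1 => if prnQ k = 0 ∧ (prnVals (k + 1)).contains (prnSeq (k + 1))
             then ((k : Int) + 1) else prnQ k

lemma prnVals_succ (k : Nat) : prnVals (k + 1) = prnVals k ++ [prnSeq k] := by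
  simp [prnVals, List.range_succ]

lemma prnVals_length (k : Nat) : (prnVals k).length = k := by simp [prnVals]

-- A's fold computes (prnVals, prnSeq, prnQ)
lemma A_fold (l : List Int) : ∀ k : Nat,
    l.foldl (fun (s : List Int × Int × Int) _ =>
      let x := s.1 ++ [s.2.1]
      let x0 := PySem.Int.mod (8 ^ 3 * s.2.1 + 144) (2 ^ 21 - 1)
      let period := if s.2.2 = 0 ∧ x.contains x0 then (x.length : Int) else s.2.2
      (x, x0, period)) (prnVals k, prnSeq k, prnQ k)
    = (prnVals (k + l.length), prnSeq (k + l.length), prnQ (k + l.length)) := by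
  induction l with
  | nil => intro k; simp
  | cons hd tl ih =>
      intro k
      have hstep : (prnVals k ++ [prnSeq k],
          PySem.Int.mod (8 ^ 3 * prnSeq k + 144) (2 ^ 21 - 1),
          if prnQ k = 0 ∧ (prnVals k ++ [prnSeq k]).contains
              (PySem.Int.mod (8 ^ 3 * prnSeq k + 144) (2 ^ 21 - 1))
          then ((prnVals k ++ [prnSeq k]).length : Int) else prnQ k)
          = (prnVals (k + 1), prnSeq (k + 1), prnQ (k + 1)) := by
        rw [← prnVals_succ]
        have hseq : prnSeq (k + 1)
            = PySem.Int.mod (8 ^ 3 * prnSeq k + 144) (2 ^ 21 - 1) := rfl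
        rw [← hseq]
        have hq : (if prnQ k = 0 ∧ (prnVals (k + 1)).contains (prnSeq (k + 1))
            then ((prnVals (k + 1)).length : Int) else prnQ k) = prnQ (k + 1) := by
          rw [prnQ, prnVals_length]
          split_ifs with h <;> simp
        rw [hq]
      simp only [List.foldl_cons, List.length_cons]
      rw [hstep, ih (k + 1)]
      have harith : k + 1 + tl.length = k + (tl.length + 1) := by omega
      rw [harith]

-- B's generation fold
lemma B_fold (l : List Int) : ∀ k : Nat,
    l.foldl (fun (s : List Int × Int) _ =>
      (s.1 ++ [s.2], PySem.Int.mod (8 ^ 3 * s.2 + 144) (2 ^ 21 - 1))) (prnVals k, prnSeq k)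
    = (prnVals (k + l.length), prnSeq (k + l.length)) := by
  induction l with
  | nil => intro k; simp
  | cons hd tl ih =>
      intro k
      simp only [List.foldl_cons, List.length_cons]
      have hstep : (prnVals k ++ [prnSeq k],
          PySem.Int.mod (8 ^ 3 * prnSeq k + 144) (2 ^ 21 - 1))
          = (prnVals (k + 1), prnSeq (k + 1)) := by
        rw [← prnVals_succ]; rfl
      rw [hstep, ih (k + 1)]
      have harith : k + 1 + tl.length = k + (tl.length + 1) := by omega
      rw [harith]

-- whether the seen-set scan over l starting from 'seen' ever breaks
def prnHasRep : List Int → PySem.Set Int → Bool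
  | [], _ => false
  | v :: rest, seen => PySem.Set.contains seen v || prnHasRep rest (PySem.Set.add seen v)

lemma contains_add (s : PySem.Set Int) (x y : Int) :
    PySem.Set.contains (PySem.Set.add s x) y = (PySem.Set.contains s y || y == x) := by
  by_cases h : y = x
  · subst h
    simp [PySem.Set.contains_eq_listContains, List.contains_eq_mem, PySem.Set.mem_add]
  · simp [PySem.Set.contains_eq_listContains, List.contains_eq_mem, PySem.Set.mem_add, h]

lemma foldl_add_contains (l : List Int) : ∀ (seen : PySem.Set Int) (v : Int),
    PySem.Set.contains (l.foldl PySem.Set.add seen) v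
    = (PySem.Set.contains seen v || l.contains v) := by
  induction l with
  | nil => intro seen v; simp
  | cons hd tl ih =>
      intro seen v
      simp only [List.foldl_cons, List.contains_cons, ih, contains_add, Bool.or_assoc]

lemma prnDetect_pos_ne_zero (l : List Int) : ∀ (seen : PySem.Set Int) (j : Int),
    1 ≤ j → prnHasRep l seen = true → prnDetect l seen j ≠ 0 := by
  induction l with
  | nil => intro seen j hj h; simp [prnHasRep] at h
  | cons hd tl ih =>
      intro seen j hj h
      simp only [prnHasRep, Bool.or_eq_true] at h
      simp only [prnDetect]
      by_cases hc : PySem.Set.contains seen hd = true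
      · simp only [hc, if_true]; omega
      · simp only [hc]
        rcases h with h | h
        · exact absurd h hc
        · exact ih _ (j + 1) (by omega) h

lemma prnDetect_of_no_rep (l : List Int) : ∀ (seen : PySem.Set Int) (j : Int),
    prnHasRep l seen = false → prnDetect l seen j = 0 := by
  induction l with
  | nil => intro seen j h; rfl
  | cons hd tl ih =>
      intro seen j h
      simp only [prnHasRep, Bool.or_eq_false_iff] at h
      simp only [prnDetect, h.1]
      exact ih _ (j + 1) h.2

lemma prnDetect_snoc (l : List Int) : ∀ (v : Int) (seen : PySem.Set Int) (j : Int),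
    prnDetect (l ++ [v]) seen j
    = if prnHasRep l seen then prnDetect l seen j
      else (if PySem.Set.contains (l.foldl PySem.Set.add seen) v
            then j + (l.length : Int) else 0) := by
  induction l with
  | nil =>
      intro v seen j
      simp only [List.nil_append, prnDetect, prnHasRep, List.foldl_nil, List.length_nil,
        Bool.false_eq_true, if_false, Int.natCast_zero, Int.add_zero]
  | cons hd tl ih =>
      intro v seen j
      by_cases hm : hd ∈ seen
      · simp [prnDetect, prnHasRep, hm]
      · simp only [List.cons_append, prnDetect, prnHasRep, List.foldl_cons, List.length_cons]
        have hc : PySem.Set.contains seen hd = false := by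
          simp [PySem.Set.contains_eq_listContains, List.contains_eq_mem, hm]
        rw [ih v (PySem.Set.add seen hd) (j + 1)]
        simp only [hc, Bool.false_eq_true, if_false, Bool.false_or]
        split_ifs with h1 h2
        · rfl
        · push_cast; omega
        · rfl

-- the scan over the first k+1 values equals A's period after k iterations
lemma detect_eq_q (k : Nat) : prnDetect (prnVals (k + 1)) PySem.Set.empty 0 = prnQ k := by
  induction k with
  | zero => decide
  | succ k ih =>
      rw [prnVals_succ (k + 1), prnDetect_snoc]
      by_cases hrep : prnHasRep (prnVals (k + 1)) PySem.Set.empty = true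
      · have hne : prnQ k ≠ 0 := by
          rw [← ih]
          rcases hv : prnVals (k + 1) with _ | ⟨a, rest⟩
          · have hl := prnVals_length (k + 1); rw [hv] at hl; simp at hl
          · rw [hv] at hrep
            have hca : PySem.Set.contains PySem.Set.empty a = false := rfl
            simp only [prnHasRep, hca, Bool.false_or] at hrep
            simp only [prnDetect, hca, Bool.false_eq_true, if_false]
            exact prnDetect_pos_ne_zero rest _ 1 (by omega) hrep
        rw [if_pos hrep, ih, prnQ]
        simp [hne]
      · have h0 : prnQ k = 0 := by
          rw [← ih]
          exact prnDetect_of_no_rep _ _ _ (by simpa using hrep)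
        rw [if_neg hrep, foldl_add_contains, prnQ]
        have hce : PySem.Set.contains PySem.Set.empty (prnSeq (k + 1)) = false := rfl
        simp only [hce, Bool.false_or, h0, true_and, Int.zero_add, prnVals_length]
        split_ifs with h
        · push_cast; ring
        · rfl

lemma slice_nil (b : Int) : PySem.List.slice ([] : List Int) none (some b) = [] := by
  simp [PySem.List.slice]

-- ===== VERDICT (by name: the statement is the Claim_ definition above) =====
theorem pseudo_rand_num_spec : Claim_equal_pseudo_rand_num := by
  intro n _hdom
  unfold Spec_pseudo_rand_num pseudo_rand_num pseudo_rand_num_alt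
  by_cases hn : 0 ≤ n
  · obtain ⟨k, hk⟩ : ∃ k : Nat, n = (k : Int) := ⟨n.toNat, (Int.toNat_of_nonneg hn).symm⟩
    subst hk
    have hlenA : (PySem.List.pyRange 0 (k : Int) 1).length = k := by
      rw [PySem.List.length_pyRange_one]; simp
    have hlenB : (PySem.List.pyRange 0 ((k : Int) + 1) 1).length = k + 1 := by
      rw [PySem.List.length_pyRange_one]; omega
    have hA := A_fold (PySem.List.pyRange 0 (k : Int) 1) 0
    have hB := B_fold (PySem.List.pyRange 0 ((k : Int) + 1) 1) 0
    rw [hlenA] at hA; rw [hlenB] at hB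
    simp only [Nat.zero_add] at hA hB
    simp only
    rw [show (([] : List Int), (3 : Int), (0 : Int)) = (prnVals 0, prnSeq 0, prnQ 0) from rfl,
        show (([] : List Int), (3 : Int)) = (prnVals 0, prnSeq 0) from rfl, hA, hB]
    simp only [detect_eq_q k]
    congr 1
    -- slice (prnVals (k+1)) [:k] = prnVals k
    rw [PySem.List.slice_to_natCast]
    rw [prnVals_succ, List.take_append_of_le_length (by rw [prnVals_length]),
        List.take_of_length_le (by rw [prnVals_length])]
  · have h1 : PySem.List.pyRange 0 n 1 = [] := PySem.List.pyRange_one_eq_nil (by omega)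
    have h2 : PySem.List.pyRange 0 (n + 1) 1 = [] := PySem.List.pyRange_one_eq_nil (by omega)
    simp only [h1, h2, List.foldl_nil]
    rw [slice_nil]
    rfl
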